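-- pv_equiv track=rewrite | github.com/lamouchedu94/Nsi | Image.py | gen_photo
-- ===== SOURCE A (Python) =====
-- def gen_photo(long, larg) :
--     res = []
--     count = 0
--     for _ in range(larg):
--         temp = []
--         for _ in range(long):
--             count += 1
--             temp.append(count)
--         res.append(temp)
--     return res
-- ===== SOURCE B (Python) =====
-- def gen_photo(long, larg):
--     # two staged passes: build the flat sequence 1..long*larg once, then chunk it into rows
--     if larg <= 0:
--         return []
--     flat = list(range(1, long * larg + 1))
--     return [flat[i * long : (i + 1) * long] for i in range(larg)]
-- ===== Notes on version B (the rewrite author's own statement) =====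
-- stated objective: alternative
-- what changed: Replaced the nested counter loops by two staged passes: first build the flat sequence 1..long*larg once, then partition it into rows by slicing flat[i*long:(i+1)*long]; no running counter and no nested loop.
import Mathlib
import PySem

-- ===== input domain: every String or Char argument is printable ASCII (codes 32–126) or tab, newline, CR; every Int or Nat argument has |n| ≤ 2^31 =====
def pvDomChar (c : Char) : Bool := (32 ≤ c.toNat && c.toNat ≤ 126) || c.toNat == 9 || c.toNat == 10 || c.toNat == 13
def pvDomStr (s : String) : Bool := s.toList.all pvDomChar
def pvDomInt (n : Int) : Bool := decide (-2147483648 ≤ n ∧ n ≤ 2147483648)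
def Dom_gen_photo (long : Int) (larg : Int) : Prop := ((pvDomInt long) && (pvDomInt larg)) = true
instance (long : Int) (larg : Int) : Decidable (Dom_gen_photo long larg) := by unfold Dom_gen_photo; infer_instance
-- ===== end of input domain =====

-- B builds the flat sequence 1..long*larg once and then partitions it into rows by slicing (two staged passes, no counter).


-- ===== PORT A =====
-- state (res, count); inner loop appends count+1 each step, outer appends the finished row
def gen_photo (long : Int) (larg : Int) : List (List Int) :=
  ((PySem.List.pyRange 0 larg 1).foldl
    (fun (st : List (List Int) × Int) _ =>
      let inner := (PySem.List.pyRange 0 long 1).foldl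
        (fun (t : List Int × Int) _ => (t.1 ++ [t.2 + 1], t.2 + 1)) ([], st.2)
      (st.1 ++ [inner.1], inner.2))
    ([], 0)).1

-- ===== PORT B =====
-- flat = list(range(1, long*larg+1)); rows are the slices flat[i*long:(i+1)*long]
def gen_photo_alt (long : Int) (larg : Int) : List (List Int) :=
  if larg ≤ 0 then []
  else
    let flat := PySem.List.pyRange 1 (long * larg + 1) 1
    (PySem.List.pyRange 0 larg 1).map
      (fun i => PySem.List.slice flat (some (i * long)) (some ((i + 1) * long)))

-- ===== PRECONDITION & SPEC =====
def Spec_gen_photo (long : Int) (larg : Int) (out : List (List Int)) : Prop := out = gen_photo_alt long larg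
instance (long : Int) (larg : Int) (out : List (List Int)) : Decidable (Spec_gen_photo long larg out) := by unfold Spec_gen_photo; infer_instance

-- ===== CLAIM (what is proved, stated in full; the proofs are below) =====
def Claim_equal_gen_photo : Prop := ∀ (long : Int) (larg : Int), Dom_gen_photo long larg → Spec_gen_photo long larg (gen_photo long larg)

-- ===== LEMMAS AND PROOFS =====

-- the inner loop appends c+1 .. c+len and leaves the counter at c+len
theorem pv_inner_eq (l : List Int) : ∀ (acc : List Int) (c : Int),
    l.foldl (fun (t : List Int × Int) _ => (t.1 ++ [t.2 + 1], t.2 + 1)) (acc, c)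
      = (acc ++ PySem.List.pyRange (c + 1) (c + l.length + 1) 1, c + l.length) := by
  induction l with
  | nil => intro acc c; simp
  | cons x xs ih =>
    intro acc c
    simp only [List.foldl_cons, ih, List.length_cons]
    rw [Prod.mk.injEq]
    push_cast
    refine ⟨?_, by ring⟩
    have h2 : c + ((xs.length : Int) + 1) + 1 = (c + 1) + (xs.length : Int) + 1 := by ring
    rw [h2, PySem.List.pyRange_one_cons (a := c + 1) (b := (c + 1) + (xs.length : Int) + 1) (by omega)]
    simp [List.append_assoc]

-- the outer body, with the inner loop replaced by its result (pv_inner_eq)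
theorem pv_body_eq (long : Int) :
    (fun (st : List (List Int) × Int) (_ : Int) =>
      let inner := (PySem.List.pyRange 0 long 1).foldl
        (fun (t : List Int × Int) _ => (t.1 ++ [t.2 + 1], t.2 + 1)) ([], st.2)
      (st.1 ++ [inner.1], inner.2))
    = (fun (st : List (List Int) × Int) _ =>
        (st.1 ++ [PySem.List.pyRange (st.2 + 1) (st.2 + (long.toNat : Int) + 1) 1],
         st.2 + (long.toNat : Int))) := by
  funext st y
  simp only [pv_inner_eq, PySem.List.length_pyRange_one, Int.sub_zero, List.nil_append]

-- the outer loop appends rows of width long.toNat, counter advancing by long.toNat per row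
theorem pv_outer_eq (m : Int) (l : List Int) : ∀ (acc : List (List Int)) (c : Int),
    l.foldl
      (fun (st : List (List Int) × Int) _ =>
        (st.1 ++ [PySem.List.pyRange (st.2 + 1) (st.2 + m + 1) 1], st.2 + m))
      (acc, c)
      = (acc ++ (List.range l.length).map
          (fun k : Nat => PySem.List.pyRange (c + (k : Int) * m + 1)
                                             (c + (k : Int) * m + m + 1) 1),
         c + l.length * m) := by
  induction l with
  | nil => intro acc c; simp
  | cons x xs ih =>
    intro acc c
    simp only [List.foldl_cons, ih, List.length_cons]
    rw [Prod.mk.injEq]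
    refine ⟨?_, by push_cast; ring⟩
    have hr : ∀ (F : Nat → List Int) (n : Nat),
        List.map F (List.range (n + 1)) = F 0 :: List.map (fun k => F (k + 1)) (List.range n) := by
      intro F n; rw [List.range_succ_eq_map, List.map_cons, List.map_map]; rfl
    rw [hr]
    simp only [Nat.cast_zero, zero_mul, add_zero, List.append_assoc, List.singleton_append]
    congr 1
    congr 1
    apply List.map_congr_left
    intro k _
    congr 1 <;> push_cast <;> ring

-- A in closed form: row r is the range r*long+1 .. r*long+long
theorem pv_A_eq (long larg : Int) :
    gen_photo long larg
      = (PySem.List.pyRange 0 larg 1).map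
          (fun r => PySem.List.pyRange (r * long + 1) (r * long + long + 1) 1) := by
  unfold gen_photo
  rw [pv_body_eq, pv_outer_eq]
  simp only [List.nil_append]
  rw [PySem.List.pyRange_one (a := 0) (b := larg)]
  simp only [List.map_map, List.length_map, List.length_range, Int.sub_zero]
  apply List.map_congr_left
  intro k _
  simp only [Function.comp]
  by_cases h : 0 ≤ long
  · rw [Int.toNat_of_nonneg h]
    congr 1 <;> ring
  · rw [PySem.List.pyRange_one_eq_nil (by simp; omega),
        PySem.List.pyRange_one_eq_nil (by nlinarith [Int.toNat_of_nonpos (le_of_lt (lt_of_not_ge h))])]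

theorem pv_slice_nil (a b : Int) : PySem.List.slice ([] : List Int) (some a) (some b) = [] := by
  apply List.eq_nil_iff_forall_not_mem.mpr
  intro x hx
  exact List.not_mem_nil (PySem.List.mem_of_mem_slice _ _ _ hx)

theorem pv_drop_pyRange (k : Nat) : ∀ (a b : Int),
    (PySem.List.pyRange a b 1).drop k = PySem.List.pyRange (a + k) b 1 := by
  induction k with
  | zero => intro a b; simp
  | succ k ih =>
    intro a b
    by_cases h : a < b
    · rw [PySem.List.pyRange_one_cons h, List.drop_succ_cons, ih]
      congr 1; push_cast; ring
    · rw [PySem.List.pyRange_one_eq_nil (by omega), PySem.List.pyRange_one_eq_nil (by push_cast; omega)]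
      simp

theorem pv_take_pyRange (k : Nat) : ∀ (a b : Int), a + k ≤ b →
    (PySem.List.pyRange a b 1).take k = PySem.List.pyRange a (a + k) 1 := by
  induction k with
  | zero => intro a b _; rw [List.take_zero, PySem.List.pyRange_one_eq_nil (by push_cast; omega)]
  | succ k ih =>
    intro a b h
    have hab : a < b := by push_cast at h ⊢; omega
    rw [PySem.List.pyRange_one_cons hab, List.take_succ_cons,
        ih (a+1) b (by push_cast at h ⊢; omega),
        PySem.List.pyRange_one_cons (a := a) (b := a + ((k:Nat)+1:Nat)) (by push_cast; omega)]
    congr 2; push_cast; ring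

-- the slice flat[i*long:(i+1)*long] is exactly the closed-form row, for 0 ≤ i < larg
theorem pv_slice_row (long larg i : Int) (h0 : 0 ≤ i) (h1 : i < larg) :
    PySem.List.slice (PySem.List.pyRange 1 (long * larg + 1) 1)
        (some (i * long)) (some ((i + 1) * long))
      = PySem.List.pyRange (i * long + 1) (i * long + long + 1) 1 := by
  by_cases hl : 0 < long
  · have ha : 0 ≤ i * long := mul_nonneg h0 (le_of_lt hl)
    have hb : 0 ≤ (i + 1) * long := mul_nonneg (by omega) (le_of_lt hl)
    rw [PySem.List.slice_toNat, pv_drop_pyRange]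
    have hsplit : (i + 1) * long = i * long + long := by ring
    have htn : ((i + 1) * long).toNat - (i * long).toNat = long.toNat := by
      rw [hsplit, Int.toNat_add ha (le_of_lt hl)]; omega
    rw [htn, Int.toNat_of_nonneg ha,
        pv_take_pyRange _ _ _ (by
          rw [Int.toNat_of_nonneg (le_of_lt hl)]
          nlinarith)]
    congr 1
    · ring
    · rw [Int.toNat_of_nonneg (le_of_lt hl)]; ring
    exact ha
    exact hb
  · have hflat : PySem.List.pyRange 1 (long * larg + 1) 1 = [] := by
      apply PySem.List.pyRange_one_eq_nil
      nlinarith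
    rw [hflat, pv_slice_nil, PySem.List.pyRange_one_eq_nil (by omega)]

-- ===== VERDICT (by name: the statement is the Claim_ definition above) =====
theorem gen_photo_spec : Claim_equal_gen_photo := by
  intro long larg _
  unfold Spec_gen_photo gen_photo_alt
  rw [pv_A_eq]
  by_cases hlarg : larg ≤ 0
  · simp [hlarg, PySem.List.pyRange_one_eq_nil hlarg]
  simp only [if_neg hlarg]
  apply List.map_congr_left
  intro i hi
  rcases (PySem.List.mem_pyRange_one).mp hi with ⟨h0, h1⟩
  exact (pv_slice_row long larg i h0 h1).symm
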